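-- pv_equiv track=rewrite | github.com/saravanakumarrc/Architecture_Journey | web_search_ai_generator.py | simplify_description
-- ===== SOURCE A (Python) =====
-- def simplify_description(description: str) -> str:
--     """Simplify technical description for general audience"""
--     # Replace technical terms with simpler alternatives
--     replacements = {
--         "infrastructure": "computer systems",
--         "multimodal": "multi-format",
--         "workloads": "tasks",
--         "enhanced": "improved",
--         "capabilities": "abilities",
--         "significantly": "greatly",
--         "implementations": "uses"
--     }
--
--     for tech_term, simple_term in replacements.items():
--         description = description.replace(tech_term, simple_term)
--
--     # Limit to 2 sentences
--     sentences = description.split('. ')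
--     if len(sentences) > 2:
--         description = '. '.join(sentences[:2]) + '.'
--
--     return description
-- ===== SOURCE B (Python) =====
-- def simplify_description(description: str) -> str:
--     """Simplify technical description for general audience (single-pass scan)."""
--     replacements = {
--         "infrastructure": "computer systems",
--         "multimodal": "multi-format",
--         "workloads": "tasks",
--         "enhanced": "improved",
--         "capabilities": "abilities",
--         "significantly": "greatly",
--         "implementations": "uses"
--     }
--
--     # One left-to-right scan over the original text: at each position emit the
--     # replacement of the first term that matches there, otherwise the character.
--     out = []
--     i = 0
--     n = len(description)
--     while i < n:
--         for term, simple in replacements.items():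
--             if description.startswith(term, i):
--                 out.append(simple)
--                 i += len(term)
--                 break
--         else:
--             out.append(description[i])
--             i += 1
--     description = ''.join(out)
--
--     # Limit to 2 sentences
--     sentences = description.split('. ')
--     if len(sentences) > 2:
--         description = '. '.join(sentences[:2]) + '.'
--
--     return description
-- ===== Notes on version B (the rewrite author's own statement) =====
-- stated objective: alternative
-- what changed: The seven sequential full-string str.replace passes are replaced by a single left-to-right scan over the original text that emits, at each position, the replacement of the first matching term, so later replacements never re-scan text produced by earlier ones.
-- outside the precondition, e.g. on simplify_description('workloadsignificantly'): A returns 'taskgreatly', B returns 'tasksignificantly'; on simplify_description('implementationsignificantly'): A returns 'implementationgreatly', B returns 'usesignificantly'; on simplify_description('capabilitiesignificantly'): A returns 'abilitiegreatly', B returns 'abilitiesignificantly'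
import Mathlib
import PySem

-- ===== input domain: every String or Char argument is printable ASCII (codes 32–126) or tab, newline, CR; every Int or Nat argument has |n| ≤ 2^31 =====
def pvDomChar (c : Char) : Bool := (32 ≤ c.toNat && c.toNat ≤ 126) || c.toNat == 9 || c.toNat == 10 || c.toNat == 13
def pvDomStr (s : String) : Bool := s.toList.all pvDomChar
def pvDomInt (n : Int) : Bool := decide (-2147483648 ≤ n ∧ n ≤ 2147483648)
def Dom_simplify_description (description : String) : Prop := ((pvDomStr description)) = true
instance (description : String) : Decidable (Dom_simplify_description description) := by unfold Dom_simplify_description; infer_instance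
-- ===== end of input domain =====

-- B replaces the seven sequential full-string replace passes by ONE left-to-right scan of the
-- original text (alternative decomposition, same cost class); equality is proved on Pre_, which
-- excludes the four term-overlap substrings described above Pre_ below.

-- ===== PORT A =====
def simplify_description (description : String) : String :=
  let replacements : List (String × String) :=
    [("infrastructure", "computer systems"), ("multimodal", "multi-format"),
     ("workloads", "tasks"), ("enhanced", "improved"), ("capabilities", "abilities"),
     ("significantly", "greatly"), ("implementations", "uses")]
  let description := replacements.foldl (fun d p => PySem.Str.replace d p.1 p.2) description
  let sentences := PySem.Chars.splitOn description.toList ". ".toList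
  if 2 < sentences.length then
    String.ofList (PySem.Chars.join ". ".toList (sentences.take 2) ++ ".".toList)
  else description

-- ===== PORT B =====
-- Source B's while-loop over an index i becomes structural recursion on the not-yet-scanned suffix;
-- the numeric literals are the lengths of the matched terms (i += len(term)).
def scanOnce (s : List Char) : List Char :=
  match s with
  | [] => []
  | c :: t =>
    if PySem.Chars.startswith (c :: t) "infrastructure".toList then
      "computer systems".toList ++ scanOnce ((c :: t).drop 14)
    else if PySem.Chars.startswith (c :: t) "multimodal".toList then
      "multi-format".toList ++ scanOnce ((c :: t).drop 10)
    else if PySem.Chars.startswith (c :: t) "workloads".toList then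
      "tasks".toList ++ scanOnce ((c :: t).drop 9)
    else if PySem.Chars.startswith (c :: t) "enhanced".toList then
      "improved".toList ++ scanOnce ((c :: t).drop 8)
    else if PySem.Chars.startswith (c :: t) "capabilities".toList then
      "abilities".toList ++ scanOnce ((c :: t).drop 12)
    else if PySem.Chars.startswith (c :: t) "significantly".toList then
      "greatly".toList ++ scanOnce ((c :: t).drop 13)
    else if PySem.Chars.startswith (c :: t) "implementations".toList then
      "uses".toList ++ scanOnce ((c :: t).drop 15)
    else c :: scanOnce t
termination_by s.length
decreasing_by all_goals (simp [List.length_drop]; try omega)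

def simplify_description_alt (description : String) : String :=
  let description := String.ofList (scanOnce description.toList)
  let sentences := PySem.Chars.splitOn description.toList ". ".toList
  if 2 < sentences.length then
    String.ofList (PySem.Chars.join ". ".toList (sentences.take 2) ++ ".".toList)
  else description

-- ===== PRECONDITION & SPEC =====
-- Pre_ excludes descriptions containing one of the four term-overlap substrings below, on which
-- the two equally defensible readings of overlapping terms disagree: A (whose later replace
-- passes re-scan text produced by earlier ones) also rewrites an occurrence of the sixth term
-- whose first letter came out of an earlier replacement (see the cited
-- excluded examples, e.g. "workloadsignificantly"), while B replaces only terms present in the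
-- original text.
def Pre_simplify_description (description : String) : Prop :=
  (PySem.Str.isIn "infrastructureignificantly" description
    || PySem.Str.isIn "workloadsignificantly" description
    || PySem.Str.isIn "capabilitiesignificantly" description
    || PySem.Str.isIn "implementationsignificantly" description) = false
instance (description : String) : Decidable (Pre_simplify_description description) := by
  unfold Pre_simplify_description; infer_instance

def pvWitness_simplify_description : String := "enhanced workloads. ok. fine"

def Spec_simplify_description (description : String) (out : String) : Prop :=
  out = simplify_description_alt description
instance (description : String) (out : String) : Decidable (Spec_simplify_description description out) := by
  unfold Spec_simplify_description; infer_instance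

-- ===== CLAIM (what is proved, stated in full; the proofs are below) =====
def Claim_equal_simplify_description : Prop := ∀ (description : String), Dom_simplify_description description → Pre_simplify_description description → Spec_simplify_description description (simplify_description description)

-- ===== LEMMAS AND PROOFS =====

-- abbreviations for the seven terms / replacements (proof-side only)
abbrev pK1 : List Char := "infrastructure".toList
abbrev pK2 : List Char := "multimodal".toList
abbrev pK3 : List Char := "workloads".toList
abbrev pK4 : List Char := "enhanced".toList
abbrev pK5 : List Char := "capabilities".toList
abbrev pK6 : List Char := "significantly".toList
abbrev pK7 : List Char := "implementations".toList
abbrev pR1 : List Char := "computer systems".toList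
abbrev pR2 : List Char := "multi-format".toList
abbrev pR3 : List Char := "tasks".toList
abbrev pR4 : List Char := "improved".toList
abbrev pR5 : List Char := "abilities".toList
abbrev pR6 : List Char := "greatly".toList
abbrev pR7 : List Char := "uses".toList
abbrev pIG : List Char := "ignificantly".toList

abbrev NoBad (cs : List Char) : Prop :=
  ¬ ("infrastructureignificantly".toList <:+: cs) ∧ ¬ ("workloadsignificantly".toList <:+: cs) ∧
  ¬ ("capabilitiesignificantly".toList <:+: cs) ∧ ¬ ("implementationsignificantly".toList <:+: cs)

-- clean recursive characterisation of Python's str.replace (for nonempty old)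
def repl (old new : List Char) (s : List Char) : List Char :=
  match s with
  | [] => []
  | c :: t =>
    if h : old ≠ [] ∧ old <+: (c :: t) then new ++ repl old new ((c :: t).drop old.length)
    else c :: repl old new t
termination_by s.length
decreasing_by
  · have : 1 ≤ old.length := by
      cases old with
      | nil => exact absurd rfl h.1
      | cons _ _ => simp
    simp [List.length_drop]; omega
  · simp

def repl7 (u : List Char) : List Char :=
  repl pK7 pR7 (repl pK6 pR6 (repl pK5 pR5 (repl pK4 pR4 (repl pK3 pR3 (repl pK2 pR2 (repl pK1 pR1 u))))))

theorem repl_nil (old new : List Char) : repl old new [] = [] := by rw [repl]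

theorem repl_cons_neg {old : List Char} (new : List Char) {c : Char} {t : List Char}
    (h : ¬ old <+: (c :: t)) : repl old new (c :: t) = c :: repl old new t := by
  rw [repl, dif_neg]; tauto

theorem repl_cons_pos {old : List Char} (new : List Char) {c : Char} {t : List Char}
    (hne : old ≠ []) (h : old <+: (c :: t)) :
    repl old new (c :: t) = new ++ repl old new ((c :: t).drop old.length) := by
  rw [repl, dif_pos ⟨hne, h⟩]

theorem repl_head {old : List Char} (new rest : List Char) (hne : old ≠ []) :
    repl old new (old ++ rest) = new ++ repl old new rest := by
  cases old with
  | nil => exact absurd rfl hne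
  | cons o os =>
    rw [show (o :: os) ++ rest = o :: (os ++ rest) from rfl,
       repl_cons_pos new hne (by exact ⟨rest, rfl⟩)]
    rw [show (o :: (os ++ rest)) = (o :: os) ++ rest from rfl, List.drop_left]

theorem repl_append {old : List Char} (new : List Char) (P rest : List Char)
    (h : ∀ p, p < P.length → ¬ old <+: (P.drop p ++ rest)) :
    repl old new (P ++ rest) = P ++ repl old new rest := by
  induction P with
  | nil => simp
  | cons c P ih =>
    rw [List.cons_append, repl_cons_neg new (by simpa using h 0 (by simp))]
    rw [ih (fun p hp => by simpa using h (p + 1) (by simpa using hp))]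
    rfl

theorem step_static {old : List Char} (new : List Char) (P u : List Char)
    (hd : ∀ p, p < P.length → ¬ (old <+: P.drop p) ∧ ¬ (P.drop p <+: old)) :
    repl old new (P ++ u) = P ++ repl old new u := by
  refine repl_append new P u (fun p hp hpre => ?_)
  rcases List.prefix_or_prefix_of_prefix hpre (List.prefix_append (P.drop p) u) with h1 | h1
  · exact (hd p hp).1 h1
  · exact (hd p hp).2 h1

theorem step_sig (P u : List Char)
    (h1 : ∀ p, p < P.length → ¬ (pK6 <+: P.drop p))
    (h2 : ∀ p, p < P.length → (P.drop p <+: pK6) → P.drop p = ['s'])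
    (hig : ¬ (pIG <+: u)) :
    repl pK6 pR6 (P ++ u) = P ++ repl pK6 pR6 u := by
  refine repl_append pR6 P u (fun p hp hpre => ?_)
  rcases List.prefix_or_prefix_of_prefix hpre (List.prefix_append (P.drop p) u) with h1' | h1'
  · exact h1 p hp h1'
  · have hs := h2 p hp h1'
    rw [hs] at hpre
    rw [show pK6 = 's' :: pIG from rfl, show (['s'] ++ u : List Char) = 's' :: u from rfl,
       List.cons_prefix_cons] at hpre
    exact hig hpre.2

-- a replacement never CREATES an occurrence of v at the front of the string
abbrev NC (v r : List Char) : Prop := ∀ w ∈ v.tails, w ≠ [] → ¬ (w <+: r) ∧ ¬ (r <+: w)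

theorem repl_no_create_gen (old new v : List Char) (hnc : NC v new) :
    ∀ (u w : List Char), w ∈ v.tails → w ≠ [] → w <+: repl old new u → w <+: u := by
  intro u
  induction u with
  | nil =>
    intro w _ hne hp
    rw [repl_nil] at hp
    exact absurd (List.prefix_nil.mp hp) hne
  | cons c t ih =>
    intro w hw hne hp
    by_cases hc : old ≠ [] ∧ old <+: (c :: t)
    · rw [repl, dif_pos hc] at hp
      rcases List.prefix_or_prefix_of_prefix hp (List.prefix_append new _) with h1 | h1
      · exact absurd h1 ((hnc w hw hne).1)
      · exact absurd h1 ((hnc w hw hne).2)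
    · rw [repl, dif_neg hc] at hp
      cases w with
      | nil => exact absurd rfl hne
      | cons a w' =>
        rw [List.cons_prefix_cons] at hp
        obtain ⟨rfl, hp'⟩ := hp
        by_cases hw' : w' = []
        · subst hw'; exact ⟨t, rfl⟩
        · have hw'tails : w' ∈ v.tails :=
            (List.mem_tails w' v).mpr ((List.suffix_cons a w').trans ((List.mem_tails _ v).mp hw))
          exact List.cons_prefix_cons.mpr ⟨rfl, ih w' hw'tails hw' hp'⟩

theorem repl_no_create (old new v : List Char) (hnc : NC v new) (hv : v ≠ []) (u : List Char)
    (h : v <+: repl old new u) : v <+: u :=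
  repl_no_create_gen old new v hnc u v ((List.mem_tails v v).mpr (List.suffix_refl v)) hv h

theorem ig_chain (u : List Char) (h : ¬ pIG <+: u) :
    ¬ pIG <+: repl pK5 pR5 (repl pK4 pR4 (repl pK3 pR3 (repl pK2 pR2 (repl pK1 pR1 u)))) :=
  fun hp => h (repl_no_create pK1 pR1 pIG (by decide) (by decide) _
    (repl_no_create pK2 pR2 pIG (by decide) (by decide) _
      (repl_no_create pK3 pR3 pIG (by decide) (by decide) _
        (repl_no_create pK4 pR4 pIG (by decide) (by decide) _
          (repl_no_create pK5 pR5 pIG (by decide) (by decide) _ hp)))))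

-- the seven branch lemmas: how the 7-stage replace chain acts on a term occurrence / a plain char
theorem stage1 (rest : List Char) (hig : ¬ pIG <+: rest) :
    repl7 (pK1 ++ rest) = pR1 ++ repl7 rest := by
  unfold repl7
  rw [repl_head pR1 rest (by decide)]
  rw [step_static pR2 pR1 _ (by decide)]
  rw [step_static pR3 pR1 _ (by decide)]
  rw [step_static pR4 pR1 _ (by decide)]
  rw [step_static pR5 pR1 _ (by decide)]
  rw [step_sig pR1 _ (by decide) (by decide) (ig_chain rest hig)]
  rw [step_static pR7 pR1 _ (by decide)]

theorem stage2 (rest : List Char) :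
    repl7 (pK2 ++ rest) = pR2 ++ repl7 rest := by
  unfold repl7
  rw [step_static pR1 pK2 _ (by decide)]
  rw [repl_head pR2 _ (by decide)]
  rw [step_static pR3 pR2 _ (by decide)]
  rw [step_static pR4 pR2 _ (by decide)]
  rw [step_static pR5 pR2 _ (by decide)]
  rw [step_static pR6 pR2 _ (by decide)]
  rw [step_static pR7 pR2 _ (by decide)]

theorem stage3 (rest : List Char) (hig : ¬ pIG <+: rest) :
    repl7 (pK3 ++ rest) = pR3 ++ repl7 rest := by
  unfold repl7
  rw [step_static pR1 pK3 _ (by decide)]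
  rw [step_static pR2 pK3 _ (by decide)]
  rw [repl_head pR3 _ (by decide)]
  rw [step_static pR4 pR3 _ (by decide)]
  rw [step_static pR5 pR3 _ (by decide)]
  rw [step_sig pR3 _ (by decide) (by decide) (ig_chain rest hig)]
  rw [step_static pR7 pR3 _ (by decide)]

theorem stage4 (rest : List Char) :
    repl7 (pK4 ++ rest) = pR4 ++ repl7 rest := by
  unfold repl7
  rw [step_static pR1 pK4 _ (by decide)]
  rw [step_static pR2 pK4 _ (by decide)]
  rw [step_static pR3 pK4 _ (by decide)]
  rw [repl_head pR4 _ (by decide)]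
  rw [step_static pR5 pR4 _ (by decide)]
  rw [step_static pR6 pR4 _ (by decide)]
  rw [step_static pR7 pR4 _ (by decide)]

theorem stage5 (rest : List Char) (hig : ¬ pIG <+: rest) :
    repl7 (pK5 ++ rest) = pR5 ++ repl7 rest := by
  unfold repl7
  rw [step_static pR1 pK5 _ (by decide)]
  rw [step_static pR2 pK5 _ (by decide)]
  rw [step_static pR3 pK5 _ (by decide)]
  rw [step_static pR4 pK5 _ (by decide)]
  rw [repl_head pR5 _ (by decide)]
  rw [step_sig pR5 _ (by decide) (by decide) (ig_chain rest hig)]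
  rw [step_static pR7 pR5 _ (by decide)]

theorem stage6 (rest : List Char) :
    repl7 (pK6 ++ rest) = pR6 ++ repl7 rest := by
  unfold repl7
  rw [step_static pR1 pK6 _ (by decide)]
  rw [step_static pR2 pK6 _ (by decide)]
  rw [step_static pR3 pK6 _ (by decide)]
  rw [step_static pR4 pK6 _ (by decide)]
  rw [step_static pR5 pK6 _ (by decide)]
  rw [repl_head pR6 _ (by decide)]
  rw [step_static pR7 pR6 _ (by decide)]

theorem stage7 (rest : List Char) (hig : ¬ pIG <+: rest) :
    repl7 (pK7 ++ rest) = pR7 ++ repl7 rest := by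
  unfold repl7
  rw [step_static pR1 pK7 _ (by decide)]
  rw [step_static pR2 pK7 _ (by decide)]
  rw [step_static pR3 pK7 _ (by decide)]
  rw [step_static pR4 pK7 _ (by decide)]
  rw [step_static pR5 pK7 _ (by decide)]
  rw [step_sig pK7 _ (by decide) (by decide) (ig_chain rest hig)]
  rw [repl_head pR7 _ (by decide)]

theorem stage0 (c : Char) (t : List Char)
    (h1 : ¬ pK1 <+: (c :: t)) (h2 : ¬ pK2 <+: (c :: t)) (h3 : ¬ pK3 <+: (c :: t))
    (h4 : ¬ pK4 <+: (c :: t)) (h5 : ¬ pK5 <+: (c :: t)) (h6 : ¬ pK6 <+: (c :: t))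
    (h7 : ¬ pK7 <+: (c :: t)) :
    repl7 (c :: t) = c :: repl7 t := by
  unfold repl7
  have e1 : repl pK1 pR1 (c :: t) = c :: repl pK1 pR1 t := repl_cons_neg pR1 h1
  have n2 : ¬ pK2 <+: repl pK1 pR1 (c :: t) := fun hp =>
    h2 (repl_no_create pK1 pR1 pK2 (by decide) (by decide) _ hp)
  have e2 : repl pK2 pR2 (repl pK1 pR1 (c :: t)) = c :: repl pK2 pR2 (repl pK1 pR1 t) := by
    rw [e1] at n2 ⊢; exact repl_cons_neg pR2 n2
  have n3 : ¬ pK3 <+: repl pK2 pR2 (repl pK1 pR1 (c :: t)) := fun hp =>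
    h3 (repl_no_create pK1 pR1 pK3 (by decide) (by decide) _
      (repl_no_create pK2 pR2 pK3 (by decide) (by decide) _ hp))
  have e3 : repl pK3 pR3 (repl pK2 pR2 (repl pK1 pR1 (c :: t)))
      = c :: repl pK3 pR3 (repl pK2 pR2 (repl pK1 pR1 t)) := by
    rw [e2] at n3 ⊢; exact repl_cons_neg pR3 n3
  have n4 : ¬ pK4 <+: repl pK3 pR3 (repl pK2 pR2 (repl pK1 pR1 (c :: t))) := fun hp =>
    h4 (repl_no_create pK1 pR1 pK4 (by decide) (by decide) _
      (repl_no_create pK2 pR2 pK4 (by decide) (by decide) _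
        (repl_no_create pK3 pR3 pK4 (by decide) (by decide) _ hp)))
  have e4 : repl pK4 pR4 (repl pK3 pR3 (repl pK2 pR2 (repl pK1 pR1 (c :: t))))
      = c :: repl pK4 pR4 (repl pK3 pR3 (repl pK2 pR2 (repl pK1 pR1 t))) := by
    rw [e3] at n4 ⊢; exact repl_cons_neg pR4 n4
  have n5 : ¬ pK5 <+: repl pK4 pR4 (repl pK3 pR3 (repl pK2 pR2 (repl pK1 pR1 (c :: t)))) := fun hp =>
    h5 (repl_no_create pK1 pR1 pK5 (by decide) (by decide) _
      (repl_no_create pK2 pR2 pK5 (by decide) (by decide) _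
        (repl_no_create pK3 pR3 pK5 (by decide) (by decide) _
          (repl_no_create pK4 pR4 pK5 (by decide) (by decide) _ hp))))
  have e5 : repl pK5 pR5 (repl pK4 pR4 (repl pK3 pR3 (repl pK2 pR2 (repl pK1 pR1 (c :: t)))))
      = c :: repl pK5 pR5 (repl pK4 pR4 (repl pK3 pR3 (repl pK2 pR2 (repl pK1 pR1 t)))) := by
    rw [e4] at n5 ⊢; exact repl_cons_neg pR5 n5
  have n6 : ¬ pK6 <+: repl pK5 pR5 (repl pK4 pR4 (repl pK3 pR3 (repl pK2 pR2 (repl pK1 pR1 (c :: t))))) := fun hp =>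
    h6 (repl_no_create pK1 pR1 pK6 (by decide) (by decide) _
      (repl_no_create pK2 pR2 pK6 (by decide) (by decide) _
        (repl_no_create pK3 pR3 pK6 (by decide) (by decide) _
          (repl_no_create pK4 pR4 pK6 (by decide) (by decide) _
            (repl_no_create pK5 pR5 pK6 (by decide) (by decide) _ hp)))))
  have e6 : repl pK6 pR6 (repl pK5 pR5 (repl pK4 pR4 (repl pK3 pR3 (repl pK2 pR2 (repl pK1 pR1 (c :: t))))))
      = c :: repl pK6 pR6 (repl pK5 pR5 (repl pK4 pR4 (repl pK3 pR3 (repl pK2 pR2 (repl pK1 pR1 t))))) := by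
    rw [e5] at n6 ⊢; exact repl_cons_neg pR6 n6
  have n7 : ¬ pK7 <+: repl pK6 pR6 (repl pK5 pR5 (repl pK4 pR4 (repl pK3 pR3 (repl pK2 pR2 (repl pK1 pR1 (c :: t)))))) := fun hp =>
    h7 (repl_no_create pK1 pR1 pK7 (by decide) (by decide) _
      (repl_no_create pK2 pR2 pK7 (by decide) (by decide) _
        (repl_no_create pK3 pR3 pK7 (by decide) (by decide) _
          (repl_no_create pK4 pR4 pK7 (by decide) (by decide) _
            (repl_no_create pK5 pR5 pK7 (by decide) (by decide) _
              (repl_no_create pK6 pR6 pK7 (by decide) (by decide) _ hp))))))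
  rw [e6] at n7 ⊢
  exact repl_cons_neg pR7 n7


-- Python's str.replace (PySem's fuel-based `go`) computes `repl`
theorem go_spec (old new : List Char) (hne : old ≠ []) :
    ∀ (fuel : Nat) (l acc : List Char), l.length ≤ fuel →
      PySem.Chars.replace.go old new fuel l acc = acc.reverse ++ repl old new l := by
  intro fuel
  induction fuel with
  | zero =>
    intro l acc hl
    have : l = [] := by cases l <;> simp_all
    subst this
    simp [PySem.Chars.replace.go, repl_nil]
  | succ f ih =>
    intro l acc hl
    cases l with
    | nil => simp [PySem.Chars.replace.go, repl_nil]
    | cons c t =>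
      have hol : 1 ≤ old.length := by cases old with
        | nil => exact absurd rfl hne
        | cons _ _ => simp
      by_cases hp : old.isPrefixOf (c :: t)
      · rw [show PySem.Chars.replace.go old new (f + 1) (c :: t) acc
            = PySem.Chars.replace.go old new f ((c :: t).drop old.length) (new.reverse ++ acc) from
            by simp [PySem.Chars.replace.go, hp]]
        rw [ih _ _ (by simp at hl ⊢; omega)]
        rw [repl_cons_pos new hne (List.isPrefixOf_iff_prefix.mp hp)]
        simp
      · rw [show PySem.Chars.replace.go old new (f + 1) (c :: t) acc
            = PySem.Chars.replace.go old new f t (c :: acc) from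
            by simp [PySem.Chars.replace.go, hp]]
        rw [ih _ _ (by simp at hl ⊢; omega)]
        rw [repl_cons_neg new (fun hq => hp (List.isPrefixOf_iff_prefix.mpr hq))]
        simp

theorem replace_eq_repl (s old new : List Char) (hne : old ≠ []) :
    PySem.Chars.replace s old new = repl old new s := by
  rw [PySem.Chars.replace]
  rw [if_neg (by simpa [List.isEmpty_iff] using hne)]
  simpa using go_spec old new hne s.length s [] le_rfl

-- the folded A-side replace chain, on char lists, is repl7
theorem bridge (s : String) :
    (PySem.Str.replace (PySem.Str.replace (PySem.Str.replace (PySem.Str.replace (PySem.Str.replace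
      (PySem.Str.replace (PySem.Str.replace s "infrastructure" "computer systems")
        "multimodal" "multi-format") "workloads" "tasks") "enhanced" "improved")
        "capabilities" "abilities") "significantly" "greatly") "implementations" "uses").toList
    = repl7 s.toList := by
  simp only [PySem.Str.toList_replace]
  rw [replace_eq_repl _ _ _ (show ("implementations".toList : List Char) ≠ [] by decide)]
  rw [replace_eq_repl _ _ _ (show ("significantly".toList : List Char) ≠ [] by decide)]
  rw [replace_eq_repl _ _ _ (show ("capabilities".toList : List Char) ≠ [] by decide)]
  rw [replace_eq_repl _ _ _ (show ("enhanced".toList : List Char) ≠ [] by decide)]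
  rw [replace_eq_repl _ _ _ (show ("workloads".toList : List Char) ≠ [] by decide)]
  rw [replace_eq_repl _ _ _ (show ("multimodal".toList : List Char) ≠ [] by decide)]
  rw [replace_eq_repl _ _ _ (show ("infrastructure".toList : List Char) ≠ [] by decide)]
  rfl

-- the main equivalence on char lists
theorem main (n : Nat) : ∀ cs : List Char, cs.length ≤ n → NoBad cs → repl7 cs = scanOnce cs := by
  induction n with
  | zero =>
    intro cs hlen _
    have : cs = [] := by cases cs <;> simp_all
    subst this
    rw [show scanOnce [] = [] from by rw [scanOnce]]
    simp [repl7, repl_nil]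
  | succ n ih =>
    intro cs hlen hbad
    cases cs with
    | nil =>
      rw [show scanOnce [] = [] from by rw [scanOnce]]
      simp [repl7, repl_nil]
    | cons c t =>
      have hlen' : t.length + 1 ≤ n + 1 := by simpa using hlen
      by_cases b1 : pK1 <+: (c :: t)
      · obtain ⟨rest, hres⟩ := b1
        have hig : ¬ pIG <+: rest := fun hp => hbad.1 (by
          obtain ⟨s2, hs2⟩ := hp
          exact ⟨[], s2, by
            rw [List.nil_append, show ("infrastructureignificantly".toList : List Char) = pK1 ++ pIG from by decide,
               List.append_assoc, hs2, hres]⟩)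
        have hsuf : rest <:+ c :: t := ⟨pK1, hres⟩
        have hbadrest : NoBad rest :=
          ⟨fun hp => hbad.1 (hp.trans hsuf.isInfix), fun hp => hbad.2.1 (hp.trans hsuf.isInfix),
           fun hp => hbad.2.2.1 (hp.trans hsuf.isInfix), fun hp => hbad.2.2.2 (hp.trans hsuf.isInfix)⟩
        have hlr : rest.length ≤ n := by
          have hl2 := congrArg List.length hres
          rw [List.length_append, show pK1.length = 14 from by decide] at hl2
          simp at hl2; omega
        have hdrop : (c :: t).drop 14 = rest := by
          rw [← hres, show (14 : Nat) = pK1.length from by decide, List.drop_left]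
        have hsw : PySem.Chars.startswith (c :: t) "infrastructure".toList = true :=
          (PySem.Chars.startswith_iff _ _).mpr ⟨rest, hres⟩
        have hscan : scanOnce (c :: t) = pR1 ++ scanOnce ((c :: t).drop 14) := by
          conv_lhs => rw [scanOnce.eq_def]
          simp only [hsw, Bool.false_eq_true, if_false, if_true]
        rw [hscan, hdrop, ← ih rest hlr hbadrest, ← stage1 rest hig, hres]
      · by_cases b2 : pK2 <+: (c :: t)
        · obtain ⟨rest, hres⟩ := b2
          have hsuf : rest <:+ c :: t := ⟨pK2, hres⟩
          have hbadrest : NoBad rest :=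
            ⟨fun hp => hbad.1 (hp.trans hsuf.isInfix), fun hp => hbad.2.1 (hp.trans hsuf.isInfix),
             fun hp => hbad.2.2.1 (hp.trans hsuf.isInfix), fun hp => hbad.2.2.2 (hp.trans hsuf.isInfix)⟩
          have hlr : rest.length ≤ n := by
            have hl2 := congrArg List.length hres
            rw [List.length_append, show pK2.length = 10 from by decide] at hl2
            simp at hl2; omega
          have hdrop : (c :: t).drop 10 = rest := by
            rw [← hres, show (10 : Nat) = pK2.length from by decide, List.drop_left]
          have hsw1 : PySem.Chars.startswith (c :: t) "infrastructure".toList = false :=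
            Bool.eq_false_iff.mpr (fun h => b1 ((PySem.Chars.startswith_iff _ _).mp h))
          have hsw : PySem.Chars.startswith (c :: t) "multimodal".toList = true :=
            (PySem.Chars.startswith_iff _ _).mpr ⟨rest, hres⟩
          have hscan : scanOnce (c :: t) = pR2 ++ scanOnce ((c :: t).drop 10) := by
            conv_lhs => rw [scanOnce.eq_def]
            simp only [hsw1, hsw, Bool.false_eq_true, if_false, if_true]
          rw [hscan, hdrop, ← ih rest hlr hbadrest, ← stage2 rest, hres]
        · by_cases b3 : pK3 <+: (c :: t)
          · obtain ⟨rest, hres⟩ := b3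
            have hig : ¬ pIG <+: rest := fun hp => hbad.2.1 (by
              obtain ⟨s2, hs2⟩ := hp
              exact ⟨[], s2, by
                rw [List.nil_append, show ("workloadsignificantly".toList : List Char) = pK3 ++ pIG from by decide,
                   List.append_assoc, hs2, hres]⟩)
            have hsuf : rest <:+ c :: t := ⟨pK3, hres⟩
            have hbadrest : NoBad rest :=
              ⟨fun hp => hbad.1 (hp.trans hsuf.isInfix), fun hp => hbad.2.1 (hp.trans hsuf.isInfix),
               fun hp => hbad.2.2.1 (hp.trans hsuf.isInfix), fun hp => hbad.2.2.2 (hp.trans hsuf.isInfix)⟩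
            have hlr : rest.length ≤ n := by
              have hl2 := congrArg List.length hres
              rw [List.length_append, show pK3.length = 9 from by decide] at hl2
              simp at hl2; omega
            have hdrop : (c :: t).drop 9 = rest := by
              rw [← hres, show (9 : Nat) = pK3.length from by decide, List.drop_left]
            have hsw1 : PySem.Chars.startswith (c :: t) "infrastructure".toList = false :=
              Bool.eq_false_iff.mpr (fun h => b1 ((PySem.Chars.startswith_iff _ _).mp h))
            have hsw2 : PySem.Chars.startswith (c :: t) "multimodal".toList = false :=
              Bool.eq_false_iff.mpr (fun h => b2 ((PySem.Chars.startswith_iff _ _).mp h))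
            have hsw : PySem.Chars.startswith (c :: t) "workloads".toList = true :=
              (PySem.Chars.startswith_iff _ _).mpr ⟨rest, hres⟩
            have hscan : scanOnce (c :: t) = pR3 ++ scanOnce ((c :: t).drop 9) := by
              conv_lhs => rw [scanOnce.eq_def]
              simp only [hsw1, hsw2, hsw, Bool.false_eq_true, if_false, if_true]
            rw [hscan, hdrop, ← ih rest hlr hbadrest, ← stage3 rest hig, hres]
          · by_cases b4 : pK4 <+: (c :: t)
            · obtain ⟨rest, hres⟩ := b4
              have hsuf : rest <:+ c :: t := ⟨pK4, hres⟩
              have hbadrest : NoBad rest :=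
                ⟨fun hp => hbad.1 (hp.trans hsuf.isInfix), fun hp => hbad.2.1 (hp.trans hsuf.isInfix),
                 fun hp => hbad.2.2.1 (hp.trans hsuf.isInfix), fun hp => hbad.2.2.2 (hp.trans hsuf.isInfix)⟩
              have hlr : rest.length ≤ n := by
                have hl2 := congrArg List.length hres
                rw [List.length_append, show pK4.length = 8 from by decide] at hl2
                simp at hl2; omega
              have hdrop : (c :: t).drop 8 = rest := by
                rw [← hres, show (8 : Nat) = pK4.length from by decide, List.drop_left]
              have hsw1 : PySem.Chars.startswith (c :: t) "infrastructure".toList = false :=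
                Bool.eq_false_iff.mpr (fun h => b1 ((PySem.Chars.startswith_iff _ _).mp h))
              have hsw2 : PySem.Chars.startswith (c :: t) "multimodal".toList = false :=
                Bool.eq_false_iff.mpr (fun h => b2 ((PySem.Chars.startswith_iff _ _).mp h))
              have hsw3 : PySem.Chars.startswith (c :: t) "workloads".toList = false :=
                Bool.eq_false_iff.mpr (fun h => b3 ((PySem.Chars.startswith_iff _ _).mp h))
              have hsw : PySem.Chars.startswith (c :: t) "enhanced".toList = true :=
                (PySem.Chars.startswith_iff _ _).mpr ⟨rest, hres⟩
              have hscan : scanOnce (c :: t) = pR4 ++ scanOnce ((c :: t).drop 8) := by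
                conv_lhs => rw [scanOnce.eq_def]
                simp only [hsw1, hsw2, hsw3, hsw, Bool.false_eq_true, if_false, if_true]
              rw [hscan, hdrop, ← ih rest hlr hbadrest, ← stage4 rest, hres]
            · by_cases b5 : pK5 <+: (c :: t)
              · obtain ⟨rest, hres⟩ := b5
                have hig : ¬ pIG <+: rest := fun hp => hbad.2.2.1 (by
                  obtain ⟨s2, hs2⟩ := hp
                  exact ⟨[], s2, by
                    rw [List.nil_append, show ("capabilitiesignificantly".toList : List Char) = pK5 ++ pIG from by decide,
                       List.append_assoc, hs2, hres]⟩)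
                have hsuf : rest <:+ c :: t := ⟨pK5, hres⟩
                have hbadrest : NoBad rest :=
                  ⟨fun hp => hbad.1 (hp.trans hsuf.isInfix), fun hp => hbad.2.1 (hp.trans hsuf.isInfix),
                   fun hp => hbad.2.2.1 (hp.trans hsuf.isInfix), fun hp => hbad.2.2.2 (hp.trans hsuf.isInfix)⟩
                have hlr : rest.length ≤ n := by
                  have hl2 := congrArg List.length hres
                  rw [List.length_append, show pK5.length = 12 from by decide] at hl2
                  simp at hl2; omega
                have hdrop : (c :: t).drop 12 = rest := by
                  rw [← hres, show (12 : Nat) = pK5.length from by decide, List.drop_left]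
                have hsw1 : PySem.Chars.startswith (c :: t) "infrastructure".toList = false :=
                  Bool.eq_false_iff.mpr (fun h => b1 ((PySem.Chars.startswith_iff _ _).mp h))
                have hsw2 : PySem.Chars.startswith (c :: t) "multimodal".toList = false :=
                  Bool.eq_false_iff.mpr (fun h => b2 ((PySem.Chars.startswith_iff _ _).mp h))
                have hsw3 : PySem.Chars.startswith (c :: t) "workloads".toList = false :=
                  Bool.eq_false_iff.mpr (fun h => b3 ((PySem.Chars.startswith_iff _ _).mp h))
                have hsw4 : PySem.Chars.startswith (c :: t) "enhanced".toList = false :=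
                  Bool.eq_false_iff.mpr (fun h => b4 ((PySem.Chars.startswith_iff _ _).mp h))
                have hsw : PySem.Chars.startswith (c :: t) "capabilities".toList = true :=
                  (PySem.Chars.startswith_iff _ _).mpr ⟨rest, hres⟩
                have hscan : scanOnce (c :: t) = pR5 ++ scanOnce ((c :: t).drop 12) := by
                  conv_lhs => rw [scanOnce.eq_def]
                  simp only [hsw1, hsw2, hsw3, hsw4, hsw, Bool.false_eq_true, if_false, if_true]
                rw [hscan, hdrop, ← ih rest hlr hbadrest, ← stage5 rest hig, hres]
              · by_cases b6 : pK6 <+: (c :: t)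
                · obtain ⟨rest, hres⟩ := b6
                  have hsuf : rest <:+ c :: t := ⟨pK6, hres⟩
                  have hbadrest : NoBad rest :=
                    ⟨fun hp => hbad.1 (hp.trans hsuf.isInfix), fun hp => hbad.2.1 (hp.trans hsuf.isInfix),
                     fun hp => hbad.2.2.1 (hp.trans hsuf.isInfix), fun hp => hbad.2.2.2 (hp.trans hsuf.isInfix)⟩
                  have hlr : rest.length ≤ n := by
                    have hl2 := congrArg List.length hres
                    rw [List.length_append, show pK6.length = 13 from by decide] at hl2
                    simp at hl2; omega
                  have hdrop : (c :: t).drop 13 = rest := by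
                    rw [← hres, show (13 : Nat) = pK6.length from by decide, List.drop_left]
                  have hsw1 : PySem.Chars.startswith (c :: t) "infrastructure".toList = false :=
                    Bool.eq_false_iff.mpr (fun h => b1 ((PySem.Chars.startswith_iff _ _).mp h))
                  have hsw2 : PySem.Chars.startswith (c :: t) "multimodal".toList = false :=
                    Bool.eq_false_iff.mpr (fun h => b2 ((PySem.Chars.startswith_iff _ _).mp h))
                  have hsw3 : PySem.Chars.startswith (c :: t) "workloads".toList = false :=
                    Bool.eq_false_iff.mpr (fun h => b3 ((PySem.Chars.startswith_iff _ _).mp h))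
                  have hsw4 : PySem.Chars.startswith (c :: t) "enhanced".toList = false :=
                    Bool.eq_false_iff.mpr (fun h => b4 ((PySem.Chars.startswith_iff _ _).mp h))
                  have hsw5 : PySem.Chars.startswith (c :: t) "capabilities".toList = false :=
                    Bool.eq_false_iff.mpr (fun h => b5 ((PySem.Chars.startswith_iff _ _).mp h))
                  have hsw : PySem.Chars.startswith (c :: t) "significantly".toList = true :=
                    (PySem.Chars.startswith_iff _ _).mpr ⟨rest, hres⟩
                  have hscan : scanOnce (c :: t) = pR6 ++ scanOnce ((c :: t).drop 13) := by
                    conv_lhs => rw [scanOnce.eq_def]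
                    simp only [hsw1, hsw2, hsw3, hsw4, hsw5, hsw, Bool.false_eq_true, if_false, if_true]
                  rw [hscan, hdrop, ← ih rest hlr hbadrest, ← stage6 rest, hres]
                · by_cases b7 : pK7 <+: (c :: t)
                  · obtain ⟨rest, hres⟩ := b7
                    have hig : ¬ pIG <+: rest := fun hp => hbad.2.2.2 (by
                      obtain ⟨s2, hs2⟩ := hp
                      exact ⟨[], s2, by
                        rw [List.nil_append, show ("implementationsignificantly".toList : List Char) = pK7 ++ pIG from by decide,
                           List.append_assoc, hs2, hres]⟩)
                    have hsuf : rest <:+ c :: t := ⟨pK7, hres⟩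
                    have hbadrest : NoBad rest :=
                      ⟨fun hp => hbad.1 (hp.trans hsuf.isInfix), fun hp => hbad.2.1 (hp.trans hsuf.isInfix),
                       fun hp => hbad.2.2.1 (hp.trans hsuf.isInfix), fun hp => hbad.2.2.2 (hp.trans hsuf.isInfix)⟩
                    have hlr : rest.length ≤ n := by
                      have hl2 := congrArg List.length hres
                      rw [List.length_append, show pK7.length = 15 from by decide] at hl2
                      simp at hl2; omega
                    have hdrop : (c :: t).drop 15 = rest := by
                      rw [← hres, show (15 : Nat) = pK7.length from by decide, List.drop_left]
                    have hsw1 : PySem.Chars.startswith (c :: t) "infrastructure".toList = false :=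
                      Bool.eq_false_iff.mpr (fun h => b1 ((PySem.Chars.startswith_iff _ _).mp h))
                    have hsw2 : PySem.Chars.startswith (c :: t) "multimodal".toList = false :=
                      Bool.eq_false_iff.mpr (fun h => b2 ((PySem.Chars.startswith_iff _ _).mp h))
                    have hsw3 : PySem.Chars.startswith (c :: t) "workloads".toList = false :=
                      Bool.eq_false_iff.mpr (fun h => b3 ((PySem.Chars.startswith_iff _ _).mp h))
                    have hsw4 : PySem.Chars.startswith (c :: t) "enhanced".toList = false :=
                      Bool.eq_false_iff.mpr (fun h => b4 ((PySem.Chars.startswith_iff _ _).mp h))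
                    have hsw5 : PySem.Chars.startswith (c :: t) "capabilities".toList = false :=
                      Bool.eq_false_iff.mpr (fun h => b5 ((PySem.Chars.startswith_iff _ _).mp h))
                    have hsw6 : PySem.Chars.startswith (c :: t) "significantly".toList = false :=
                      Bool.eq_false_iff.mpr (fun h => b6 ((PySem.Chars.startswith_iff _ _).mp h))
                    have hsw : PySem.Chars.startswith (c :: t) "implementations".toList = true :=
                      (PySem.Chars.startswith_iff _ _).mpr ⟨rest, hres⟩
                    have hscan : scanOnce (c :: t) = pR7 ++ scanOnce ((c :: t).drop 15) := by
                      conv_lhs => rw [scanOnce.eq_def]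
                      simp only [hsw1, hsw2, hsw3, hsw4, hsw5, hsw6, hsw, Bool.false_eq_true, if_false, if_true]
                    rw [hscan, hdrop, ← ih rest hlr hbadrest, ← stage7 rest hig, hres]
                  · have hsw1 : PySem.Chars.startswith (c :: t) "infrastructure".toList = false :=
                      Bool.eq_false_iff.mpr (fun h => b1 ((PySem.Chars.startswith_iff _ _).mp h))
                    have hsw2 : PySem.Chars.startswith (c :: t) "multimodal".toList = false :=
                      Bool.eq_false_iff.mpr (fun h => b2 ((PySem.Chars.startswith_iff _ _).mp h))
                    have hsw3 : PySem.Chars.startswith (c :: t) "workloads".toList = false :=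
                      Bool.eq_false_iff.mpr (fun h => b3 ((PySem.Chars.startswith_iff _ _).mp h))
                    have hsw4 : PySem.Chars.startswith (c :: t) "enhanced".toList = false :=
                      Bool.eq_false_iff.mpr (fun h => b4 ((PySem.Chars.startswith_iff _ _).mp h))
                    have hsw5 : PySem.Chars.startswith (c :: t) "capabilities".toList = false :=
                      Bool.eq_false_iff.mpr (fun h => b5 ((PySem.Chars.startswith_iff _ _).mp h))
                    have hsw6 : PySem.Chars.startswith (c :: t) "significantly".toList = false :=
                      Bool.eq_false_iff.mpr (fun h => b6 ((PySem.Chars.startswith_iff _ _).mp h))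
                    have hsw7 : PySem.Chars.startswith (c :: t) "implementations".toList = false :=
                      Bool.eq_false_iff.mpr (fun h => b7 ((PySem.Chars.startswith_iff _ _).mp h))
                    have hscan : scanOnce (c :: t) = c :: scanOnce t := by
                      conv_lhs => rw [scanOnce.eq_def]
                      simp only [hsw1, hsw2, hsw3, hsw4, hsw5, hsw6, hsw7, Bool.false_eq_true, if_false, if_true]
                    have hsuf : t <:+ c :: t := List.suffix_cons c t
                    have hbt : NoBad t :=
                      ⟨fun hp => hbad.1 (hp.trans hsuf.isInfix), fun hp => hbad.2.1 (hp.trans hsuf.isInfix),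
                       fun hp => hbad.2.2.1 (hp.trans hsuf.isInfix), fun hp => hbad.2.2.2 (hp.trans hsuf.isInfix)⟩
                    rw [hscan, ← ih t (by omega) hbt]
                    exact stage0 c t b1 b2 b3 b4 b5 b6 b7

-- ===== VERDICT (by name: the statement is the Claim_ definition above) =====
set_option maxHeartbeats 2000000 in
theorem simplify_description_spec : Claim_equal_simplify_description := by
  unfold Claim_equal_simplify_description Spec_simplify_description
  intro s _ hPre
  have hnb : NoBad s.toList := by
    simp only [Pre_simplify_description, Bool.or_eq_false_iff] at hPre
    obtain ⟨⟨⟨d1, d2⟩, d3⟩, d4⟩ := hPre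
    refine ⟨fun hp => ?_, fun hp => ?_, fun hp => ?_, fun hp => ?_⟩
    · rw [(PySem.Str.isIn_iff_infix _ _).mpr hp] at d1; cases d1
    · rw [(PySem.Str.isIn_iff_infix _ _).mpr hp] at d2; cases d2
    · rw [(PySem.Str.isIn_iff_infix _ _).mpr hp] at d3; cases d3
    · rw [(PySem.Str.isIn_iff_infix _ _).mpr hp] at d4; cases d4
  have key : PySem.Str.replace (PySem.Str.replace (PySem.Str.replace (PySem.Str.replace (PySem.Str.replace
      (PySem.Str.replace (PySem.Str.replace s "infrastructure" "computer systems")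
        "multimodal" "multi-format") "workloads" "tasks") "enhanced" "improved")
        "capabilities" "abilities") "significantly" "greatly") "implementations" "uses"
      = String.ofList (scanOnce s.toList) := by
    have h2 := bridge s
    rw [main s.toList.length s.toList le_rfl hnb] at h2
    have h3 := congrArg String.ofList h2
    rw [String.ofList_toList] at h3
    exact h3
  simp only [simplify_description, simplify_description_alt, List.foldl]
  rw [key]
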